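-- pv_equiv track=rewrite | github.com/edaaydinea/HackerRank | Algorithms/04 - Sorting/Distant Pairs.py | point_dist
-- ===== SOURCE A (Python) =====
-- import copy
--
-- def primary_distance(a, b, c):
--     dist_array = min(abs(a - b), c - abs(a - b))
--     return (dist_array)
--
-- def point_dist(array, c):
--     global_min = 0
--     common_info = {}
--     array2 = copy.deepcopy(array)
--     for indice, couple_i in enumerate(array):
--         a_i, b_i = couple_i[0], couple_i[1]
--         try:
--             common_info[a_i, b_i]
--         except KeyError:
--             common_info[(a_i, b_i)] = primary_distance(a_i, b_i, c)
--         for couple_j in array[indice + 1:]: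
--             a_j, b_j = couple_j[0], couple_j[1]
--
--             d_1 = common_info[a_i, b_i]
--             d_2 = primary_distance(a_i, b_j, c)
--             d_3 = primary_distance(a_i, a_j, c)
--             d_4 = primary_distance(b_i, a_j, c)
--             d_5 = primary_distance(b_i, b_j, c)
--             try:
--                 d_6 = common_info[(a_j, b_j)]
--             except KeyError:
--                 d_6 = primary_distance(a_j, b_j, c)
--                 common_info[(a_j, b_j)] = d_6
--
--             global_min = max(global_min, min(d_1, min(d_2, min(d_3, min(d_4, min(d_5, d_6))))))
--     return (global_min)
-- ===== SOURCE B (Python) =====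
-- def _circ(a, b, c):
--     d = abs(a - b)
--     return min(d, c - d)
--
-- def _feasible(array, c, k):
--     # is there a pair of points whose six circular endpoint distances are all >= k?
--     for i, (ai, bi) in enumerate(array):
--         if _circ(ai, bi, c) < k:
--             continue
--         for aj, bj in array[i + 1:]:
--             if (_circ(aj, bj, c) >= k and _circ(ai, aj, c) >= k
--                     and _circ(ai, bj, c) >= k and _circ(bi, aj, c) >= k
--                     and _circ(bi, bj, c) >= k):
--                 return True
--     return False
--
-- def point_dist(array, c):
--     # binary search the answer: every pair value lies in [min-side 0, c // 2]
--     lo, hi = 0, max(0, c // 2)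
--     while lo < hi:
--         mid = (lo + hi + 1) // 2
--         if _feasible(array, c, mid):
--             lo = mid
--         else:
--             hi = mid - 1
--     return lo
-- ===== Notes on version B (the rewrite author's own statement) =====
-- stated objective: alternative
-- what changed: Instead of directly computing the max of the six-distance minimum over all pairs with a memo dict, B binary-searches the answer in [0, c//2] using a boolean feasibility check ('is there a pair whose six circular endpoint distances are all >= k?') with early pruning and early exit.
import Mathlib
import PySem

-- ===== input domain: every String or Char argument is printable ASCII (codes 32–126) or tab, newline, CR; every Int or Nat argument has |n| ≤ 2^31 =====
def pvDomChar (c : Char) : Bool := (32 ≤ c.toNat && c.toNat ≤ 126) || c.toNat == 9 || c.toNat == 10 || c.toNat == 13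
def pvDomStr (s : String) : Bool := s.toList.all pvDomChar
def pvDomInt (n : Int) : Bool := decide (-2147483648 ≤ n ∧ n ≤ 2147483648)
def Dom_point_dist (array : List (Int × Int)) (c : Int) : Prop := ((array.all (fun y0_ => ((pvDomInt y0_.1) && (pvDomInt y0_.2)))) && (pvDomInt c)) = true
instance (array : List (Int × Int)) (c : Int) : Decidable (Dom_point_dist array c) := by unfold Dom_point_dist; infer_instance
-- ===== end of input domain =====

-- B replaces A's direct quadratic maximisation (deepcopy + memo dict + try/except) by a binary
-- search on the answer in [0, c//2] with a boolean pair-feasibility check; same return value.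

-- ===== PORT A =====
-- primary_distance(a, b, c)
def primaryDistance (a b c : Int) : Int := min |a - b| (c - |a - b|)

-- literal transliteration of A: global_min/common_info state, deepcopy (unused copy),
-- enumerate + slice array[indice+1:], try/except KeyError as get?-match.
def point_dist (array : List (Int × Int)) (c : Int) : Int :=
  let array2 := array  -- array2 = copy.deepcopy(array)  (never read afterwards, as in A)
  (((PySem.List.enumerate array 0).foldl
    (fun (st : Int × PySem.Dict (Int × Int) Int) p =>
      let indice := p.1
      let couple_i := p.2
      let a_i := couple_i.1
      let b_i := couple_i.2
      -- try: common_info[a_i, b_i]  except KeyError: insert primary_distance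
      let ci : PySem.Dict (Int × Int) Int :=
        match st.2.get? (a_i, b_i) with
        | some _ => st.2
        | none => st.2.insert (a_i, b_i) (primaryDistance a_i b_i c)
      (PySem.List.slice array (some (indice + 1)) none).foldl
        (fun (st2 : Int × PySem.Dict (Int × Int) Int) couple_j =>
          let a_j := couple_j.1
          let b_j := couple_j.2
          let d_1 := (st2.2.get? (a_i, b_i)).getD 0  -- key present: inserted above, never erased
          let d_2 := primaryDistance a_i b_j c
          let d_3 := primaryDistance a_i a_j c
          let d_4 := primaryDistance b_i a_j c
          let d_5 := primaryDistance b_i b_j c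
          -- try: d_6 = common_info[(a_j, b_j)]  except KeyError: compute and insert
          let p6 : Int × PySem.Dict (Int × Int) Int :=
            match st2.2.get? (a_j, b_j) with
            | some v => (v, st2.2)
            | none => (primaryDistance a_j b_j c,
                       st2.2.insert (a_j, b_j) (primaryDistance a_j b_j c))
          (max st2.1 (min d_1 (min d_2 (min d_3 (min d_4 (min d_5 p6.1))))), p6.2))
        (st.1, ci))
    ((0 : Int), PySem.Dict.empty)).1)

-- ===== PORT B =====
-- _circ(a, b, c)
def circDist (a b c : Int) : Int :=
  let d := |a - b|
  min d (c - d)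

-- _feasible(array, c, k): the outer 'for i, (ai, bi) in enumerate(array)' with the inner scan of
-- array[i+1:] is transcribed as structural recursion over suffixes (head = element i, tail = the
-- slice); 'continue' is the if-then-false, 'return True' is the short-circuit ||/any.
def feasibleB (c k : Int) : List (Int × Int) → Bool
  | [] => false
  | p :: rest =>
      ((if circDist p.1 p.2 c < k then false
        else rest.any (fun q =>
          decide (k ≤ circDist q.1 q.2 c) && decide (k ≤ circDist p.1 q.1 c) &&
          decide (k ≤ circDist p.1 q.2 c) && decide (k ≤ circDist p.2 q.1 c) &&
          decide (k ≤ circDist p.2 q.2 c)))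
       || feasibleB c k rest)

-- midpoint bounds, used by bsearchB's termination proof
theorem pvMidBounds (lo hi : Int) (h : lo < hi) :
    lo < PySem.Int.floordiv (lo + hi + 1) 2 ∧ PySem.Int.floordiv (lo + hi + 1) 2 ≤ hi := by
  rw [PySem.Int.floordiv_eq_ediv_of_pos (by omega : (0:Int) < 2)]
  omega

-- the 'while lo < hi' loop of B
def bsearchB (array : List (Int × Int)) (c lo hi : Int) : Int :=
  if h : lo < hi then
    let mid := PySem.Int.floordiv (lo + hi + 1) 2
    if feasibleB c mid array then bsearchB array c mid hi
    else bsearchB array c lo (mid - 1)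
  else lo
termination_by (hi - lo).toNat
decreasing_by
  · have := pvMidBounds lo hi h; omega
  · have := pvMidBounds lo hi h; omega

-- literal transliteration of B
def point_dist_alt (array : List (Int × Int)) (c : Int) : Int :=
  bsearchB array c 0 (max 0 (PySem.Int.floordiv c 2))

-- ===== PRECONDITION & SPEC =====
def Spec_point_dist (array : List (Int × Int)) (c : Int) (out : Int) : Prop := out = point_dist_alt array c
instance (array : List (Int × Int)) (c : Int) (out : Int) : Decidable (Spec_point_dist array c out) := by unfold Spec_point_dist; infer_instance

-- ===== CLAIM (what is proved, stated in full; the proofs are below) =====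
def Claim_equal_point_dist : Prop := ∀ (array : List (Int × Int)) (c : Int), Dom_point_dist array c → Spec_point_dist array c (point_dist array c)

-- ===== LEMMAS AND PROOFS =====

-- the value A combines for an (earlier, later) pair of points
def pairVal (c : Int) (pq : (Int × Int) × (Int × Int)) : Int :=
  min (primaryDistance pq.1.1 pq.1.2 c) (min (primaryDistance pq.1.1 pq.2.2 c) (min (primaryDistance pq.1.1 pq.2.1 c)
    (min (primaryDistance pq.1.2 pq.2.1 c) (min (primaryDistance pq.1.2 pq.2.2 c) (primaryDistance pq.2.1 pq.2.2 c)))))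

-- A's pair order: each element against the rest of its suffix
def pairsA {α : Type} : List α → List (α × α)
  | [] => []
  | x :: xs => xs.map (fun y => (x, y)) ++ pairsA xs

def GoodDict (c : Int) (d : PySem.Dict (Int × Int) Int) : Prop :=
  ∀ k v, d.get? k = some v → v = primaryDistance k.1 k.2 c

theorem goodDict_empty (c : Int) : GoodDict c PySem.Dict.empty := by
  intro k v h
  simp [PySem.Dict.get?_empty] at h

theorem goodDict_insert (c : Int) (d : PySem.Dict (Int × Int) Int) (k : Int × Int)
    (hd : GoodDict c d) : GoodDict c (d.insert k (primaryDistance k.1 k.2 c)) := by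
  intro k' v h
  rw [PySem.Dict.get?_insert] at h
  split at h
  · cases h; subst ‹k' = k›; rfl
  · exact hd k' v h

-- ===== named step functions (definitionally the lambdas inside port A) =====

def innerStepA (c a b : Int) (st2 : Int × PySem.Dict (Int × Int) Int) (couple_j : Int × Int) :
    Int × PySem.Dict (Int × Int) Int :=
  let a_j := couple_j.1
  let b_j := couple_j.2
  let d_1 := (st2.2.get? (a, b)).getD 0
  let d_2 := primaryDistance a b_j c
  let d_3 := primaryDistance a a_j c
  let d_4 := primaryDistance b a_j c
  let d_5 := primaryDistance b b_j c
  let p6 : Int × PySem.Dict (Int × Int) Int :=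
    match st2.2.get? (a_j, b_j) with
    | some v => (v, st2.2)
    | none => (primaryDistance a_j b_j c,
               st2.2.insert (a_j, b_j) (primaryDistance a_j b_j c))
  (max st2.1 (min d_1 (min d_2 (min d_3 (min d_4 (min d_5 p6.1))))), p6.2)

def outerStepA (array : List (Int × Int)) (c : Int) (st : Int × PySem.Dict (Int × Int) Int)
    (p : Int × (Int × Int)) : Int × PySem.Dict (Int × Int) Int :=
  let ci : PySem.Dict (Int × Int) Int :=
    match st.2.get? (p.2.1, p.2.2) with
    | some _ => st.2
    | none => st.2.insert (p.2.1, p.2.2) (primaryDistance p.2.1 p.2.2 c)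
  (PySem.List.slice array (some (p.1 + 1)) none).foldl (innerStepA c p.2.1 p.2.2) (st.1, ci)

theorem point_dist_eq_foldA (array : List (Int × Int)) (c : Int) :
    point_dist array c =
      ((PySem.List.enumerate array 0).foldl (outerStepA array c) (0, PySem.Dict.empty)).1 := rfl

-- ===== A-side characterisation =====

theorem innerA_spec (c : Int) (a b : Int) (tail : List (Int × Int)) :
    ∀ (gm : Int) (d : PySem.Dict (Int × Int) Int), GoodDict c d →
      d.get? (a, b) = some (primaryDistance a b c) →
      (tail.foldl (innerStepA c a b) (gm, d)).1 =
        (tail.map (fun q => pairVal c ((a, b), q))).foldl max gm ∧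
      GoodDict c (tail.foldl (innerStepA c a b) (gm, d)).2 ∧
      (tail.foldl (innerStepA c a b) (gm, d)).2.get? (a, b) = some (primaryDistance a b c) := by
  induction tail with
  | nil => intro gm d hd hk; exact ⟨rfl, hd, hk⟩
  | cons q ts ih =>
      intro gm d hd hk
      rw [List.foldl_cons]
      have hd1 : (d.get? (a, b)).getD 0 = primaryDistance a b c := by rw [hk]; rfl
      have hstep : innerStepA c a b (gm, d) q =
          (max gm (pairVal c ((a, b), q)),
           match d.get? (q.1, q.2) with
           | some _ => d
           | none => d.insert (q.1, q.2) (primaryDistance q.1 q.2 c)) ∧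
          GoodDict c (innerStepA c a b (gm, d) q).2 ∧
          (innerStepA c a b (gm, d) q).2.get? (a, b) = some (primaryDistance a b c) := by
        cases h6 : d.get? (q.1, q.2) with
        | some v =>
            have hv : v = primaryDistance q.1 q.2 c := hd (q.1, q.2) v h6
            refine ⟨?_, ?_, ?_⟩ <;> simp only [innerStepA, h6, hd1, pairVal, hv]
            · exact hd
            · exact hk
        | none =>
            have hne : (a, b) ≠ (q.1, q.2) := by
              intro he; rw [he] at hk; rw [hk] at h6; cases h6
            refine ⟨?_, ?_, ?_⟩ <;> simp only [innerStepA, h6, hd1, pairVal]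
            · exact goodDict_insert c d (q.1, q.2) hd
            · rw [PySem.Dict.get?_insert_of_ne _ _ hne]; exact hk
      rw [hstep.1]
      have := ih (max gm (pairVal c ((a, b), q))) _ hstep.2.1 hstep.2.2
      rw [hstep.1] at this
      exact ⟨this.1, this.2.1, this.2.2⟩

theorem outerA_spec (array : List (Int × Int)) (c : Int) :
    ∀ (xs : List (Int × Int)) (n : Nat), xs = array.drop n →
    ∀ (gm : Int) (d : PySem.Dict (Int × Int) Int), GoodDict c d →
      ((PySem.List.enumerate xs (n : Int)).foldl (outerStepA array c) (gm, d)).1 =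
        ((pairsA xs).map (pairVal c)).foldl max gm := by
  intro xs
  induction xs with
  | nil => intro n _ gm d _; simp [PySem.List.enumerate, pairsA]
  | cons x xs' ih =>
      intro n hdrop gm d hd
      rw [PySem.List.enumerate_cons, List.foldl_cons]
      have hci : GoodDict c (match d.get? (x.1, x.2) with
            | some _ => d
            | none => d.insert (x.1, x.2) (primaryDistance x.1 x.2 c)) ∧
          (match d.get? (x.1, x.2) with
            | some _ => d
            | none => d.insert (x.1, x.2) (primaryDistance x.1 x.2 c)).get? (x.1, x.2) =
            some (primaryDistance x.1 x.2 c) := by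
        cases h : d.get? (x.1, x.2) with
        | some v => exact ⟨hd, by rw [h, hd (x.1, x.2) v h]⟩
        | none => exact ⟨goodDict_insert c d (x.1, x.2) hd, PySem.Dict.get?_insert_self _ _ _⟩
      have hslice : PySem.List.slice array (some ((n : Int) + 1)) none = xs' := by
        have : ((n : Int) + 1) = ((n + 1 : Nat) : Int) := by push_cast; ring
        rw [this, PySem.List.slice_from_natCast]
        have : array.drop (n + 1) = (array.drop n).drop 1 := by
          rw [List.drop_drop]
        rw [this, ← hdrop]
        rfl
      have hstep : outerStepA array c (gm, d) ((n : Int), x) =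
          xs'.foldl (innerStepA c x.1 x.2) (gm,
            match d.get? (x.1, x.2) with
            | some _ => d
            | none => d.insert (x.1, x.2) (primaryDistance x.1 x.2 c)) := by
        simp only [outerStepA, hslice]
      rw [hstep]
      have hdd : xs' = array.drop (n + 1) := by
        rw [← List.drop_drop, ← hdrop]; rfl
      obtain ⟨h1, h2, -⟩ := innerA_spec c x.1 x.2 xs' gm _ hci.1 hci.2
      have hcast : ((n : Int) + 1) = ((n + 1 : Nat) : Int) := by push_cast; ring
      rw [hcast]
      set st1 := xs'.foldl (innerStepA c x.1 x.2) (gm,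
        match d.get? (x.1, x.2) with
        | some _ => d
        | none => d.insert (x.1, x.2) (primaryDistance x.1 x.2 c)) with hst1
      have hrest := ih (n + 1) hdd st1.1 st1.2 h2
      have heta : st1 = (st1.1, st1.2) := rfl
      rw [heta, hrest, h1]
      show _ = ((xs'.map (fun y => (x, y)) ++ pairsA xs').map (pairVal c)).foldl max gm
      rw [List.map_append, List.foldl_append, List.map_map]
      rfl

theorem point_dist_eq_pairsA (array : List (Int × Int)) (c : Int) :
    point_dist array c = ((pairsA array).map (pairVal c)).foldl max 0 := by
  rw [point_dist_eq_foldA]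
  have h := outerA_spec array c array 0 (by simp) 0 PySem.Dict.empty (goodDict_empty c)
  simpa using h

-- ===== B-side characterisation =====

theorem pvAnyCongrMem {α : Type} (l : List α) (f g : α → Bool)
    (h : ∀ x ∈ l, f x = g x) : l.any f = l.any g := by
  induction l with
  | nil => rfl
  | cons x xs ih =>
      simp only [List.any_cons, h x List.mem_cons_self,
        ih (fun y hy => h y (List.mem_cons_of_mem _ hy))]

theorem inner_eq_pairVal (k d1 d2 d3 d4 d5 d6 : Int) (h : k ≤ d1) :
    (decide (k ≤ d6) && decide (k ≤ d3) && decide (k ≤ d2) && decide (k ≤ d4) && decide (k ≤ d5))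
      = decide (k ≤ min d1 (min d2 (min d3 (min d4 (min d5 d6))))) := by
  by_cases h2 : k ≤ d2 <;> by_cases h3 : k ≤ d3 <;> by_cases h4 : k ≤ d4 <;>
    by_cases h5 : k ≤ d5 <;> by_cases h6 : k ≤ d6 <;>
    simp [h, h2, h3, h4, h5, h6]

theorem feasibleB_eq_any (c k : Int) (l : List (Int × Int)) :
    feasibleB c k l = (pairsA l).any (fun pq => decide (k ≤ pairVal c pq)) := by
  induction l with
  | nil => rfl
  | cons p rest ih =>
      show (_ || feasibleB c k rest) = _
      rw [ih]
      show _ = ((rest.map (fun y => (p, y)) ++ pairsA rest).any _)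
      rw [List.any_append, List.any_map]
      congr 1
      by_cases h : circDist p.1 p.2 c < k
      · rw [if_pos h]
        symm
        rw [List.any_eq_false]
        intro q hq
        simp only [Function.comp, decide_eq_true_eq, pairVal, primaryDistance, circDist] at *
        omega
      · rw [if_neg h]
        have hk : k ≤ primaryDistance p.1 p.2 c := by
          simp only [circDist, primaryDistance] at h ⊢; omega
        refine pvAnyCongrMem _ _ _ (fun q hq => ?_)
        exact inner_eq_pairVal k _ _ _ _ _ _ hk

-- facts about a max-fold
theorem foldl_max_facts (l : List Int) : ∀ (acc : Int),
    (l.foldl max acc = acc ∨ l.foldl max acc ∈ l) ∧ acc ≤ l.foldl max acc ∧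
      ∀ v ∈ l, v ≤ l.foldl max acc := by
  induction l with
  | nil => intro acc; simp
  | cons x xs ih =>
      intro acc
      rw [List.foldl_cons]
      obtain ⟨hmem, hle, hub⟩ := ih (max acc x)
      refine ⟨?_, le_trans (le_max_left _ _) hle, ?_⟩
      · rcases hmem with h | h
        · rcases max_choice acc x with he | he
          · exact Or.inl (h.trans he)
          · refine Or.inr ?_
            rw [h, he]
            exact List.mem_cons_self
        · exact Or.inr (List.mem_cons_of_mem _ h)
      · intro v hv
        rcases List.mem_cons.1 hv with h | h
        · subst h; exact le_trans (le_max_right _ _) hle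
        · exact hub v h

theorem pairVal_le_half (c : Int) (pq : (Int × Int) × (Int × Int)) :
    pairVal c pq ≤ PySem.Int.floordiv c 2 := by
  rw [PySem.Int.floordiv_eq_ediv_of_pos (by omega : (0:Int) < 2)]
  simp only [pairVal, primaryDistance]
  omega

theorem bsearchB_correct (array : List (Int × Int)) (c M : Int)
    (H : ∀ k : Int, 1 ≤ k → (feasibleB c k array = true ↔ k ≤ M)) :
    ∀ (n : Nat) (lo hi : Int), (hi - lo).toNat ≤ n → 0 ≤ lo → lo ≤ M → M ≤ hi →
      bsearchB array c lo hi = M := by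
  intro n
  induction n with
  | zero =>
      intro lo hi hn h0 hlo hhi
      rw [bsearchB]
      have : ¬ lo < hi := by omega
      rw [dif_neg this]
      omega
  | succ m ih =>
      intro lo hi hn h0 hlo hhi
      rw [bsearchB]
      by_cases h : lo < hi
      · rw [dif_pos h]
        obtain ⟨hm1, hm2⟩ := pvMidBounds lo hi h
        set mid := PySem.Int.floordiv (lo + hi + 1) 2 with hmid
        by_cases hf : feasibleB c mid array = true
        · rw [if_pos hf]
          have : mid ≤ M := (H mid (by omega)).1 hf
          exact ih mid hi (by omega) (by omega) this hhi
        · rw [if_neg hf]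
          have : ¬ mid ≤ M := fun hle => hf ((H mid (by omega)).2 hle)
          exact ih lo (mid - 1) (by omega) h0 hlo (by omega)
      · rw [dif_neg h]; omega

theorem point_dist_alt_eq_max (array : List (Int × Int)) (c : Int) :
    point_dist_alt array c = ((pairsA array).map (pairVal c)).foldl max 0 := by
  set vals := (pairsA array).map (pairVal c) with hvals
  set M := vals.foldl max 0 with hM
  obtain ⟨hmem, hle0, hub⟩ := foldl_max_facts vals 0
  have H : ∀ k : Int, 1 ≤ k → (feasibleB c k array = true ↔ k ≤ M) := by
    intro k hk
    rw [feasibleB_eq_any, List.any_eq_true]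
    constructor
    · rintro ⟨pq, hpq, hdec⟩
      have : k ≤ pairVal c pq := of_decide_eq_true hdec
      exact le_trans this (hub _ (List.mem_map_of_mem hpq))
    · intro hkM
      rw [hM] at hkM
      rcases hmem with h | h
      · omega
      · obtain ⟨pq, hpq, hval⟩ := List.mem_map.1 h
        exact ⟨pq, hpq, decide_eq_true (by rw [hval]; exact hkM)⟩
  have hMhi : M ≤ max 0 (PySem.Int.floordiv c 2) := by
    rcases hmem with h | h
    · rw [hM, h]; exact le_max_left _ _
    · obtain ⟨pq, hpq, hval⟩ := List.mem_map.1 h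
      rw [hM, ← hval]
      exact le_trans (pairVal_le_half c pq) (le_max_right _ _)
  exact bsearchB_correct array c M H (max 0 (PySem.Int.floordiv c 2) - 0).toNat 0 _ le_rfl
    le_rfl hle0 hMhi

-- ===== VERDICT (by name: the statement is the Claim_ definition above) =====
theorem point_dist_spec : Claim_equal_point_dist := by
  intro array c _
  show point_dist array c = point_dist_alt array c
  rw [point_dist_eq_pairsA, point_dist_alt_eq_max]
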